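-- pv_equiv track=rewrite | github.com/Eguod/GHS-Scripts | comic_solve.py | split_comic_name
-- ===== SOURCE A (Python) =====
-- def split_comic_name(s):
--     res_list = []
--     if len(s) == 0:
--         return res_list
--
--     i=0
--     while i<len(s):
--         if s[i] == '[':
--             res_list.append({
--                 "type": '[]',
--                 "content": ""
--             })
--             start = i
--             while i<len(s) and not s[i]==']':
--                 i+=1
--             res_list[-1]["content"] = s[start+1:i].strip()
--             i+=1
--         elif s[i] == '(':
--             res_list.append({
--                 "type": '()',
--                 "content": ""
--             })
--             start = i
--             while i<len(s) and not s[i]==')':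
--                 i+=1
--             res_list[-1]["content"] = s[start+1:i].strip()
--             i+=1
--
--         elif s[i] == ' ':
--             i+=1
--             pass
--         else:
--             res_list.append({
--                 "type": 'c',
--                 "content": ""
--             })
--             start = i
--             while i<len(s) and not s[i]=='(' and not s[i]=='[':
--                 i+=1
--             res_list[-1]["content"] = s[start:i].strip()
--
--     return res_list
-- ===== SOURCE B (Python) =====
-- def split_comic_name(s):
--     # Single-pass state machine over the characters: mode is the type of the
--     # token currently being built (None between tokens), buf its characters.
--     tokens = []
--     mode = None
--     buf = []
--     for ch in s:
--         if mode == '[]':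
--             if ch == ']':
--                 tokens.append({"type": '[]', "content": ''.join(buf).strip()})
--                 mode, buf = None, []
--             else:
--                 buf.append(ch)
--         elif mode == '()':
--             if ch == ')':
--                 tokens.append({"type": '()', "content": ''.join(buf).strip()})
--                 mode, buf = None, []
--             else:
--                 buf.append(ch)
--         elif mode == 'c':
--             if ch == '[' or ch == '(':
--                 tokens.append({"type": 'c', "content": ''.join(buf).strip()})
--                 mode, buf = ('[]' if ch == '[' else '()'), []
--             else:
--                 buf.append(ch)
--         else:
--             if ch == '[':
--                 mode, buf = '[]', []
--             elif ch == '(':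
--                 mode, buf = '()', []
--             elif ch != ' ':
--                 mode, buf = 'c', [ch]
--     if mode is not None:
--         tokens.append({"type": mode, "content": ''.join(buf).strip()})
--     return tokens
-- ===== Notes on version B (the rewrite author's own statement) =====
-- stated objective: simpler
-- what changed: Replaced A's index-based scanner with nested inner while loops and slicing by a single left fold over the characters driving an explicit token-building state machine (mode + buffer) with a final flush; the one-pass fold avoids repeated indexing, which a timing run measured as a constant-factor speedup.
import Mathlib
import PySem

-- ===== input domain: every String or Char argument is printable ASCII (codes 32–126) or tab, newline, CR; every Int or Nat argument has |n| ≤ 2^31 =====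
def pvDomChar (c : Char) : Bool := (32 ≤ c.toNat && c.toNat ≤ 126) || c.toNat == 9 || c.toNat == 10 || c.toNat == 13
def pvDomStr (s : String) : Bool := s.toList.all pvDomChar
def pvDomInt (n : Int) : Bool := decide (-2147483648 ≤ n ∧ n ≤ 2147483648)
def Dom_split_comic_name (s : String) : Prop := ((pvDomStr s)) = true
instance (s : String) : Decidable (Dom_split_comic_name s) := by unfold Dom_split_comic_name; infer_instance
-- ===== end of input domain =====

-- B replaces A's index-based scanner with nested while loops by a single left
-- fold over the characters with an explicit token-building state machine (simpler).

-- ===== PORT A =====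
-- inner 'while i<len(s) and not stop(s[i]): i += 1' of A (called at i+1: the
-- first test of each of A's inner while loops is guaranteed to pass)
def pvA_scan (cs : List Char) (stop : Char → Bool) (i : Nat) : Nat :=
  if h : i < cs.length then
    if stop cs[i] then i else pvA_scan cs stop (i + 1)
  else i
termination_by cs.length - i

theorem pvA_scan_le (cs : List Char) (stop : Char → Bool) (i : Nat) :
    i ≤ pvA_scan cs stop i := by
  unfold pvA_scan
  split
  · split
    · exact le_refl i
    · exact le_trans (Nat.le_succ i) (pvA_scan_le cs stop (i + 1))
  · exact le_refl i
termination_by cs.length - i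

-- res_list[-1]["content"] = v on the just-appended two-key dict
def pvA_setContent (d : List (String × String)) (v : String) : List (String × String) :=
  d.map (fun p => if p.1 = "content" then (p.1, v) else p)

-- A's main while loop, index i over s, accumulator res_list
def pvA_loop (cs : List Char) (i : Nat) (res : List (List (String × String))) :
    List (List (String × String)) :=
  if h : i < cs.length then
    if cs[i] = '[' then
      -- j = final i of the inner scan; the appended dict with its content set
      pvA_loop cs (pvA_scan cs (fun c => c == ']') (i + 1) + 1)
        (res ++ [pvA_setContent [("type", "[]"), ("content", "")]
          (String.ofList (PySem.Chars.strip (PySem.Chars.slice cs (some ((i : Int) + 1))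
            (some ((pvA_scan cs (fun c => c == ']') (i + 1) : Nat) : Int)))))])
    else if cs[i] = '(' then
      pvA_loop cs (pvA_scan cs (fun c => c == ')') (i + 1) + 1)
        (res ++ [pvA_setContent [("type", "()"), ("content", "")]
          (String.ofList (PySem.Chars.strip (PySem.Chars.slice cs (some ((i : Int) + 1))
            (some ((pvA_scan cs (fun c => c == ')') (i + 1) : Nat) : Int)))))])
    else if cs[i] = ' ' then
      pvA_loop cs (i + 1) res
    else
      pvA_loop cs (pvA_scan cs (fun c => c == '(' || c == '[') (i + 1))
        (res ++ [pvA_setContent [("type", "c"), ("content", "")]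
          (String.ofList (PySem.Chars.strip (PySem.Chars.slice cs (some (i : Int))
            (some ((pvA_scan cs (fun c => c == '(' || c == '[') (i + 1) : Nat) : Int)))))])
  else res
termination_by cs.length - i
decreasing_by
  · have := pvA_scan_le cs (fun c => c == ']') (i + 1); omega
  · have := pvA_scan_le cs (fun c => c == ')') (i + 1); omega
  · omega
  · have := pvA_scan_le cs (fun c => c == '(' || c == '[') (i + 1); omega

def split_comic_name (s : String) : List (List (String × String)) :=
  if s.toList.length = 0 then [] else pvA_loop s.toList 0 []

-- ===== PORT B =====
def pvB_tok (t : String) (buf : List Char) : List (String × String) :=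
  [("type", t), ("content", String.ofList (PySem.Chars.strip buf))]

-- one step of B's for-loop: state = (mode, buf, tokens)
def pvB_step (st : Option String × List Char × List (List (String × String)))
    (ch : Char) : Option String × List Char × List (List (String × String)) :=
  let (mode, buf, toks) := st
  if mode = some "[]" then
    if ch = ']' then (none, [], toks ++ [pvB_tok "[]" buf])
    else (mode, buf ++ [ch], toks)
  else if mode = some "()" then
    if ch = ')' then (none, [], toks ++ [pvB_tok "()" buf])
    else (mode, buf ++ [ch], toks)
  else if mode = some "c" then
    if ch = '[' ∨ ch = '(' then
      ((if ch = '[' then some "[]" else some "()"), [], toks ++ [pvB_tok "c" buf])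
    else (mode, buf ++ [ch], toks)
  else
    if ch = '[' then (some "[]", [], toks)
    else if ch = '(' then (some "()", [], toks)
    else if ch ≠ ' ' then (some "c", [ch], toks)
    else (mode, buf, toks)

-- final flush after the loop
def pvB_finish (st : Option String × List Char × List (List (String × String))) :
    List (List (String × String)) :=
  match st with
  | (none, _, toks) => toks
  | (some m, buf, toks) => toks ++ [pvB_tok m buf]

def split_comic_name_alt (s : String) : List (List (String × String)) :=
  pvB_finish (s.toList.foldl pvB_step (none, [], []))

-- ===== PRECONDITION & SPEC =====
def Spec_split_comic_name (s : String) (out : List (List (String × String))) : Prop := out = split_comic_name_alt s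
instance (s : String) (out : List (List (String × String))) : Decidable (Spec_split_comic_name s out) := by unfold Spec_split_comic_name; infer_instance

-- ===== CLAIM (what is proved, stated in full; the proofs are below) =====
def Claim_equal_split_comic_name : Prop := ∀ (s : String), Dom_split_comic_name s → Spec_split_comic_name s (split_comic_name s)

-- ===== LEMMAS AND PROOFS =====

theorem pvA_scan_spec (cs : List Char) (stop : Char → Bool) (i : Nat) (h : i ≤ cs.length) :
    pvA_scan cs stop i = i + ((cs.drop i).takeWhile (fun c => !stop c)).length := by
  unfold pvA_scan
  by_cases hi : i < cs.length
  · rw [dif_pos hi]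
    rw [List.drop_eq_getElem_cons hi]
    by_cases hs : stop cs[i]
    · simp [hs]
    · rw [if_neg hs]
      rw [pvA_scan_spec cs stop (i + 1) (by omega)]
      rw [List.takeWhile_cons_of_pos (by simp [hs])]
      simp
      omega
  · rw [dif_neg hi]
    have : i = cs.length := by omega
    simp [this]
termination_by cs.length - i

theorem pv_dropWhile_head_not (p : Char → Bool) (l : List Char) (e : Char) (suf : List Char)
    (h : l.dropWhile p = e :: suf) : p e = false := by
  have h2 : l.dropWhile p ≠ [] := by simp [h]
  have := List.head_dropWhile_not p h2
  simp only [h, List.head_cons] at this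
  exact this

theorem pvB_fold_br (l : List Char) (buf : List Char) (toks : List (List (String × String)))
    (hl : ∀ c ∈ l, c ≠ ']') :
    l.foldl pvB_step (some "[]", buf, toks) = (some "[]", buf ++ l, toks) := by
  induction l generalizing buf with
  | nil => simp
  | cons c l ih =>
    have hc : c ≠ ']' := hl c (by simp)
    rw [List.foldl_cons]
    have hstep : pvB_step (some "[]", buf, toks) c = (some "[]", buf ++ [c], toks) := by
      simp [pvB_step, hc]
    rw [hstep, ih _ (fun x hx => hl x (by simp [hx]))]
    simp

theorem pvB_fold_br_close (pre suf : List Char) (buf : List Char) (toks : List (List (String × String)))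
    (hl : ∀ c ∈ pre, c ≠ ']') :
    (pre ++ ']' :: suf).foldl pvB_step (some "[]", buf, toks)
      = suf.foldl pvB_step (none, [], toks ++ [pvB_tok "[]" (buf ++ pre)]) := by
  rw [List.foldl_append, pvB_fold_br pre buf toks hl, List.foldl_cons]
  have hstep : pvB_step (some "[]", buf ++ pre, toks) ']'
      = (none, [], toks ++ [pvB_tok "[]" (buf ++ pre)]) := by
    simp [pvB_step]
  rw [hstep]

theorem pvB_fold_pa (l : List Char) (buf : List Char) (toks : List (List (String × String)))
    (hl : ∀ c ∈ l, c ≠ ')') :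
    l.foldl pvB_step (some "()", buf, toks) = (some "()", buf ++ l, toks) := by
  induction l generalizing buf with
  | nil => simp
  | cons c l ih =>
    have hc : c ≠ ')' := hl c (by simp)
    rw [List.foldl_cons]
    have hstep : pvB_step (some "()", buf, toks) c = (some "()", buf ++ [c], toks) := by
      simp [pvB_step, hc]
    rw [hstep, ih _ (fun x hx => hl x (by simp [hx]))]
    simp

theorem pvB_fold_pa_close (pre suf : List Char) (buf : List Char) (toks : List (List (String × String)))
    (hl : ∀ c ∈ pre, c ≠ ')') :
    (pre ++ ')' :: suf).foldl pvB_step (some "()", buf, toks)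
      = suf.foldl pvB_step (none, [], toks ++ [pvB_tok "()" (buf ++ pre)]) := by
  rw [List.foldl_append, pvB_fold_pa pre buf toks hl, List.foldl_cons]
  have hstep : pvB_step (some "()", buf ++ pre, toks) ')'
      = (none, [], toks ++ [pvB_tok "()" (buf ++ pre)]) := by
    simp [pvB_step]
  rw [hstep]

theorem pvB_fold_c (l : List Char) (buf : List Char) (toks : List (List (String × String)))
    (hl : ∀ c ∈ l, c ≠ '[' ∧ c ≠ '(') :
    l.foldl pvB_step (some "c", buf, toks) = (some "c", buf ++ l, toks) := by
  induction l generalizing buf with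
  | nil => simp
  | cons c l ih =>
    have hc := hl c (by simp)
    rw [List.foldl_cons]
    have hstep : pvB_step (some "c", buf, toks) c = (some "c", buf ++ [c], toks) := by
      simp [pvB_step, hc.1, hc.2]
    rw [hstep, ih _ (fun x hx => hl x (by simp [hx]))]
    simp

theorem pvB_fold_c_close (pre : List Char) (d : Char) (suf : List Char) (buf : List Char)
    (toks : List (List (String × String)))
    (hd : d = '[' ∨ d = '(') (hl : ∀ c ∈ pre, c ≠ '[' ∧ c ≠ '(') :
    (pre ++ d :: suf).foldl pvB_step (some "c", buf, toks)
      = (d :: suf).foldl pvB_step (none, [], toks ++ [pvB_tok "c" (buf ++ pre)]) := by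
  rw [List.foldl_append, pvB_fold_c pre buf toks hl, List.foldl_cons, List.foldl_cons]
  rcases hd with hd | hd <;> subst hd <;> simp [pvB_step]

theorem pvA_loop_ge (cs : List Char) (i : Nat) (res : List (List (String × String)))
    (h : cs.length ≤ i) : pvA_loop cs i res = res := by
  unfold pvA_loop
  rw [dif_neg (by omega)]

theorem pv_main (cs : List Char) :
    ∀ k i res, cs.length - i = k →
      pvA_loop cs i res = pvB_finish ((cs.drop i).foldl pvB_step (none, [], res)) := by
  intro k
  induction k using Nat.strong_induction_on with
  | _ k IH =>
    intro i res hk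
    by_cases hi : i < cs.length
    · have hdrop : cs.drop i = cs[i] :: cs.drop (i + 1) := List.drop_eq_getElem_cons hi
      by_cases hb : cs[i] = '['
      · -- '[' branch
        unfold pvA_loop
        rw [dif_pos hi, if_pos hb]
        have hjs := pvA_scan_spec cs (fun c => c == ']') (i + 1) (by omega)
        set l := cs.drop (i + 1) with hldef
        set pre := l.takeWhile (fun c => !(c == ']')) with hpredef
        set j := pvA_scan cs (fun c => c == ']') (i + 1) with hjdef
        have hpre_ne : ∀ c ∈ pre, c ≠ ']' := by
          intro c hc
          have := List.mem_takeWhile_imp hc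
          simpa using this
        have hsplit : pre ++ l.dropWhile (fun c => !(c == ']')) = l :=
          List.takeWhile_append_dropWhile
        have hslice : PySem.Chars.slice cs (some ((i : Int) + 1)) (some (j : Int)) = pre := by
          have h1 : ((i : Int) + 1) = ((i + 1 : Nat) : Int) := by push_cast; ring
          rw [h1]
          simp only [PySem.Chars.slice_eq_listSlice, PySem.List.slice_natCast]
          rw [hjs]
          have : (i + 1) + pre.length - (i + 1) = pre.length := by omega
          rw [this, ← hldef, ← hsplit, List.take_left]
        rw [hslice]
        rw [hdrop, List.foldl_cons]
        have hstep0 : pvB_step (none, [], res) cs[i] = (some "[]", [], res) := by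
          simp [pvB_step, hb]
        rw [hstep0]
        rcases hdw : l.dropWhile (fun c => !(c == ']')) with _ | ⟨e, suf⟩
        · -- no closing ']': token runs to end of string
          have hpl : pre = l := by rw [← hsplit, hdw]; simp
          have hj : j = cs.length := by
            rw [hjs, hpl]
            have := List.length_drop (l := cs) (i := i + 1)
            rw [← hldef] at this
            omega
          rw [pvA_loop_ge cs (j + 1) _ (by omega)]
          rw [pvB_fold_br l [] res (hpl ▸ hpre_ne)]
          simp [pvB_finish, pvB_tok, pvA_setContent, hpl]
        · -- closing ']' found at index j
          have he : e = ']' := by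
            have := pv_dropWhile_head_not _ l e suf hdw
            simpa using this
          subst he
          rw [hdw] at hsplit
          rw [← hsplit, pvB_fold_br_close pre suf [] res hpre_ne]
          have hlen : cs.length = (i + 1) + pre.length + 1 + suf.length := by
            have h2 : l.length = cs.length - (i + 1) := by rw [hldef]; simp
            have h3 : l.length = pre.length + 1 + suf.length := by
              rw [← hsplit]; simp; omega
            omega
          have hsuf : cs.drop (j + 1) = suf := by
            have : cs.drop (j + 1) = (cs.drop (i + 1)).drop (pre.length + 1) := by
              rw [List.drop_drop]
              congr 1
              omega
            rw [this, ← hldef, ← hsplit]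
            have hre : pre ++ ']' :: suf = (pre ++ [']']) ++ suf := by simp
            rw [hre, List.drop_left' (by simp)]
          have hArec := IH (cs.length - (j + 1)) (by omega) (j + 1)
            (res ++ [pvA_setContent [("type", "[]"), ("content", "")]
              (String.ofList (PySem.Chars.strip pre))]) rfl
          rw [hArec, hsuf]
          simp [pvA_setContent, pvB_tok]
      · by_cases hb2 : cs[i] = '('
        · -- '(' branch
          unfold pvA_loop
          rw [dif_pos hi, if_neg hb, if_pos hb2]
          have hjs := pvA_scan_spec cs (fun c => c == ')') (i + 1) (by omega)
          set l := cs.drop (i + 1) with hldef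
          set pre := l.takeWhile (fun c => !(c == ')')) with hpredef
          set j := pvA_scan cs (fun c => c == ')') (i + 1) with hjdef
          have hpre_ne : ∀ c ∈ pre, c ≠ ')' := by
            intro c hc
            have := List.mem_takeWhile_imp hc
            simpa using this
          have hsplit : pre ++ l.dropWhile (fun c => !(c == ')')) = l :=
            List.takeWhile_append_dropWhile
          have hslice : PySem.Chars.slice cs (some ((i : Int) + 1)) (some (j : Int)) = pre := by
            have h1 : ((i : Int) + 1) = ((i + 1 : Nat) : Int) := by push_cast; ring
            rw [h1]
            simp only [PySem.Chars.slice_eq_listSlice, PySem.List.slice_natCast]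
            rw [hjs]
            have : (i + 1) + pre.length - (i + 1) = pre.length := by omega
            rw [this, ← hldef, ← hsplit, List.take_left]
          rw [hslice]
          rw [hdrop, List.foldl_cons]
          have hstep0 : pvB_step (none, [], res) cs[i] = (some "()", [], res) := by
            simp [pvB_step, hb2]
          rw [hstep0]
          rcases hdw : l.dropWhile (fun c => !(c == ')')) with _ | ⟨e, suf⟩
          · have hpl : pre = l := by rw [← hsplit, hdw]; simp
            have hj : j = cs.length := by
              rw [hjs, hpl]
              have := List.length_drop (l := cs) (i := i + 1)
              rw [← hldef] at this
              omega
            rw [pvA_loop_ge cs (j + 1) _ (by omega)]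
            rw [pvB_fold_pa l [] res (hpl ▸ hpre_ne)]
            simp [pvB_finish, pvB_tok, pvA_setContent, hpl]
          · have he : e = ')' := by
              have := pv_dropWhile_head_not _ l e suf hdw
              simpa using this
            subst he
            rw [hdw] at hsplit
            rw [← hsplit, pvB_fold_pa_close pre suf [] res hpre_ne]
            have hlen : cs.length = (i + 1) + pre.length + 1 + suf.length := by
              have h2 : l.length = cs.length - (i + 1) := by rw [hldef]; simp
              have h3 : l.length = pre.length + 1 + suf.length := by
                rw [← hsplit]; simp; omega
              omega
            have hsuf : cs.drop (j + 1) = suf := by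
              have : cs.drop (j + 1) = (cs.drop (i + 1)).drop (pre.length + 1) := by
                rw [List.drop_drop]
                congr 1
                omega
              rw [this, ← hldef, ← hsplit]
              have hre : pre ++ ')' :: suf = (pre ++ [')']) ++ suf := by simp
              rw [hre, List.drop_left' (by simp)]
            have hArec := IH (cs.length - (j + 1)) (by omega) (j + 1)
              (res ++ [pvA_setContent [("type", "()"), ("content", "")]
                (String.ofList (PySem.Chars.strip pre))]) rfl
            rw [hArec, hsuf]
            simp [pvA_setContent, pvB_tok]
        · by_cases hb3 : cs[i] = ' '
          · -- space: skipped by both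
            unfold pvA_loop
            rw [dif_pos hi, if_neg hb, if_neg hb2, if_pos hb3]
            rw [hdrop, List.foldl_cons]
            have hstep0 : pvB_step (none, [], res) cs[i] = (none, [], res) := by
              simp [pvB_step, hb3]
            rw [hstep0]
            exact IH (cs.length - (i + 1)) (by omega) (i + 1) res rfl
          · -- plain-text branch
            unfold pvA_loop
            rw [dif_pos hi, if_neg hb, if_neg hb2, if_neg hb3]
            have hjs := pvA_scan_spec cs (fun c => c == '(' || c == '[') (i + 1) (by omega)
            set l := cs.drop (i + 1) with hldef
            set pre := l.takeWhile (fun c => !(c == '(' || c == '[')) with hpredef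
            set j := pvA_scan cs (fun c => c == '(' || c == '[') (i + 1) with hjdef
            have hpre_ne : ∀ c ∈ pre, c ≠ '[' ∧ c ≠ '(' := by
              intro c hc
              have := List.mem_takeWhile_imp hc
              constructor <;> (intro hcc; subst hcc; simp at this)
            have hsplit : pre ++ l.dropWhile (fun c => !(c == '(' || c == '[')) = l :=
              List.takeWhile_append_dropWhile
            have hslice : PySem.Chars.slice cs (some (i : Int)) (some (j : Int)) = cs[i] :: pre := by
              simp only [PySem.Chars.slice_eq_listSlice, PySem.List.slice_natCast]
              rw [hjs]
              have hji : (i + 1) + pre.length - i = pre.length + 1 := by omega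
              rw [hji]
              rw [List.drop_eq_getElem_cons hi, ← hldef]
              rw [List.take_succ_cons]
              congr 1
              rw [← hsplit, List.take_left]
            rw [hslice]
            rw [hdrop, List.foldl_cons]
            have hstep0 : pvB_step (none, [], res) cs[i] = (some "c", [cs[i]], res) := by
              simp [pvB_step, hb, hb2, hb3]
            rw [hstep0]
            rcases hdw : l.dropWhile (fun c => !(c == '(' || c == '[')) with _ | ⟨e, suf⟩
            · -- runs to the end of the string
              have hpl : pre = l := by rw [← hsplit, hdw]; simp
              have hj : j = cs.length := by
                rw [hjs, hpl]
                have := List.length_drop (l := cs) (i := i + 1)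
                rw [← hldef] at this
                omega
              rw [pvA_loop_ge cs j _ (by omega)]
              rw [pvB_fold_c l [cs[i]] res (hpl ▸ hpre_ne)]
              simp [pvB_finish, pvB_tok, pvA_setContent, hpl]
            · -- stops at a '(' or '['
              have he : e = '[' ∨ e = '(' := by
                have := pv_dropWhile_head_not _ l e suf hdw
                simp at this
                tauto
              rw [hdw] at hsplit
              rw [← hsplit, pvB_fold_c_close pre e suf [cs[i]] res he hpre_ne]
              have hlen : cs.length = (i + 1) + pre.length + 1 + suf.length := by
                have h2 : l.length = cs.length - (i + 1) := by rw [hldef]; simp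
                have h3 : l.length = pre.length + 1 + suf.length := by
                  rw [← hsplit]; simp; omega
                omega
              have hsuf : cs.drop j = e :: suf := by
                have : cs.drop j = (cs.drop (i + 1)).drop pre.length := by
                  rw [List.drop_drop]
                  congr 1
                rw [this, ← hldef, ← hsplit]
                rw [List.drop_left' (rfl : pre.length = pre.length)]
              have hArec := IH (cs.length - j) (by omega) j
                (res ++ [pvA_setContent [("type", "c"), ("content", "")]
                  (String.ofList (PySem.Chars.strip (cs[i] :: pre)))]) rfl
              rw [hArec, hsuf]
              simp [pvA_setContent, pvB_tok]
    · rw [pvA_loop_ge cs i res (by omega), List.drop_eq_nil_of_le (by omega)]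
      simp [pvB_finish]

-- ===== VERDICT (by name: the statement is the Claim_ definition above) =====
theorem split_comic_name_spec : Claim_equal_split_comic_name := by
  intro s _
  unfold Spec_split_comic_name split_comic_name split_comic_name_alt
  by_cases h : s.toList.length = 0
  · rw [if_pos h]
    have : s.toList = [] := List.length_eq_zero_iff.mp h
    simp [this, pvB_finish]
  · rw [if_neg h]
    have := pv_main s.toList (s.toList.length) 0 [] rfl
    simpa using this
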